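-- pv_equiv track=rewrite | github.com/openharmony/arkcompiler_runtime_core | static_core/plugins/ets/tools/migration_visualizer/src/arkts_migration_visualizer/build/integrate_dep.py | build_leaf_module_names
-- ===== SOURCE A (Python) =====
-- from typing import Any, DefaultDict, Dict, Iterable, List, Optional, Sequence, Set, Tuple
--
-- def split_path_parts(raw_path: str) -> List[str]:
--     normalized = str(raw_path or "").strip().replace("\\", "/")
--     return [part for part in normalized.split("/") if part and part != "."]
--
-- def last_path_part(raw_path: str) -> str:
--     parts = split_path_parts(raw_path)
--     return parts[-1] if parts else str(raw_path or "")
--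
-- def normalize_har_name(raw_name: str) -> str:
--     name = str(raw_name or "").strip().replace("\\", "/")
--     if not name:
--         return ""
--
--     if name.startswith("@"):
--         if "/" in name:
--             return name
--         parts = [part for part in name.split("/") if part]
--         if len(parts) >= 2:
--             return parts[1]
--         if name.startswith("@ohos."):
--             return name[len("@ohos.") :]
--         return name
--
--     candidate = last_path_part(name)
--     lower_candidate = candidate.lower()
--     for suffix in (".z.so", ".har", ".hsp", ".hap", ".ets", ".ts", ".js", ".so"):
--         if lower_candidate.endswith(suffix):
--             return candidate[: -len(suffix)]
--     return candidate
--
-- def build_leaf_module_names(module_raw_paths: Sequence[str]) -> Tuple[List[str], Set[str]]: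
--     module_parts = [(raw_path, split_path_parts(raw_path)) for raw_path in module_raw_paths if raw_path]
--     leaf_names: List[str] = []
--     container_names: Set[str] = set()
--     seen_leaf_names: Set[str] = set()
--
--     for raw_path, parts in module_parts:
--         if not parts:
--             continue
--         is_container = False
--         for other_raw_path, other_parts in module_parts:
--             if raw_path == other_raw_path:
--                 continue
--             if len(parts) >= len(other_parts):
--                 continue
--             if all(left.lower() == right.lower() for left, right in zip(parts, other_parts)):
--                 is_container = True
--                 break
--
--         canonical = normalize_har_name(raw_path)
--         if not canonical:
--             continue
--         if is_container:
--             container_names.add(canonical)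
--             continue
--         if canonical not in seen_leaf_names:
--             leaf_names.append(canonical)
--             seen_leaf_names.add(canonical)
--
--     return leaf_names, container_names
-- ===== SOURCE B (Python) =====
-- from typing import List, Sequence, Set, Tuple
--
-- _SUFFIXES = (".z.so", ".har", ".hsp", ".hap", ".ets", ".ts", ".js", ".so")
--
--
-- def _segments(raw_path: str) -> List[str]:
--     cleaned = str(raw_path or "").strip().replace("\\", "/")
--     return [seg for seg in cleaned.split("/") if seg and seg != "."]
--
--
-- def _strip_suffix(candidate: str) -> str:
--     lc = candidate.lower()
--     cut = next((len(suf) for suf in _SUFFIXES if lc.endswith(suf)), 0)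
--     return candidate[: len(candidate) - cut]
--
--
-- def _canonical(raw_path: str) -> str:
--     name = str(raw_path or "").strip().replace("\\", "/")
--     if not name:
--         return ""
--     if name.startswith("@"):
--         if "/" in name:
--             return name
--         pieces = [piece for piece in name.split("/") if piece]
--         if len(pieces) >= 2:
--             return pieces[1]
--         return name[len("@ohos."):] if name.startswith("@ohos.") else name
--     segs = _segments(name)
--     return _strip_suffix(segs[-1] if segs else name)
--
--
-- def build_leaf_module_names(module_raw_paths: Sequence[str]) -> Tuple[List[str], Set[str]]:
--     # Staged pipeline: (1) lowered segment tuples, (2) one set of all proper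
--     # prefixes, (3) tag each surviving entry container/leaf by one set lookup,
--     # (4) dedup the two streams.
--     kept = [(rp, _segments(rp)) for rp in module_raw_paths if rp]
--     lowered = [tuple(seg.lower() for seg in segs) for _, segs in kept]
--     proper_prefixes = {low[:k] for low in lowered for k in range(len(low))}
--
--     tagged = []
--     for (rp, segs), low in zip(kept, lowered):
--         if segs:
--             canonical = _canonical(rp)
--             if canonical:
--                 tagged.append((canonical, low in proper_prefixes))
--
--     leaves = list(dict.fromkeys(c for c, is_cont in tagged if not is_cont))
--     containers = {c for c, is_cont in tagged if is_cont}
--     return leaves, containers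
-- ===== Notes on version B (the rewrite author's own statement) =====
-- stated objective: faster
-- what changed: A decides 'container' by scanning all other entries for each entry (quadratic all-pairs prefix comparison) inside one interleaved loop; B builds one set of all proper prefixes of the lowercased segment tuples, tags each entry container/leaf with a single set lookup, and dedups the two tagged streams in separate passes (with the suffix strip done by a first-match find instead of an 8-branch loop).
import Mathlib
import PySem

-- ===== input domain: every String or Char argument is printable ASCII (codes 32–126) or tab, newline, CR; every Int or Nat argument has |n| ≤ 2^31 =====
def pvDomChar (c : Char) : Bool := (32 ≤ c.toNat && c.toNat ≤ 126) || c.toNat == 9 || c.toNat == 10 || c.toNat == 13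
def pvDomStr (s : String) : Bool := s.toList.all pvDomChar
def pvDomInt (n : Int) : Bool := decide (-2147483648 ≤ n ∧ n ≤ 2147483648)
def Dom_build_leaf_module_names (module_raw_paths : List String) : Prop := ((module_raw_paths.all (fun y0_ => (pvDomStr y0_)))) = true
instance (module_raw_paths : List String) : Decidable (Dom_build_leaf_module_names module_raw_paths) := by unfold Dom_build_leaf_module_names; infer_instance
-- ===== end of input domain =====

-- B replaces A's quadratic all-pairs prefix scan by one precomputed set of proper
-- prefixes of the lowercased segment tuples, and A's single interleaved loop by a
-- staged pipeline (tag each entry, then dedup the two streams).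

-- ===== PORT A =====
def split_path_parts (raw_path : String) : List String :=
  let normalized := PySem.Str.replace (PySem.Str.strip raw_path) "\\" "/"
  ((PySem.Str.split? normalized "/").getD []).filter (fun p => p != "" && p != ".")

def last_path_part (raw_path : String) : String :=
  let parts := split_path_parts raw_path
  match parts.getLast? with            -- parts[-1] if parts else raw_path
  | some p => p
  | none => raw_path

-- the suffix-stripping for-loop of normalize_har_name
def nhn_strip_suffix (candidate lower_candidate : String) : List String → String
  | [] => candidate
  | suf :: rest =>
      if PySem.Str.endswith lower_candidate suf then
        PySem.Str.slice candidate none (some (-(PySem.Str.len suf)))   -- candidate[:-len(suffix)]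
      else nhn_strip_suffix candidate lower_candidate rest

def normalize_har_name (raw_name : String) : String :=
  let name := PySem.Str.replace (PySem.Str.strip raw_name) "\\" "/"
  if name = "" then ""
  else if PySem.Str.startswith name "@" then
    if PySem.Str.isIn "/" name then name
    else
      let parts := ((PySem.Str.split? name "/").getD []).filter (fun p => p != "")
      if parts.length ≥ 2 then (PySem.List.pyGet? parts 1).getD ""   -- parts[1], in range since length ≥ 2
      else if PySem.Str.startswith name "@ohos." then PySem.Str.slice name (some 6) none
      else name
  else
    let candidate := last_path_part name
    let lower_candidate := PySem.Str.lower candidate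
    nhn_strip_suffix candidate lower_candidate [".z.so", ".har", ".hsp", ".hap", ".ets", ".ts", ".js", ".so"]

-- A's inner for-loop over module_parts (break on first hit = any)
def bln_is_container (module_parts : List (String × List String))
    (raw_path : String) (parts : List String) : Bool :=
  module_parts.any (fun o =>
    !(raw_path == o.1) && (parts.length < o.2.length) &&
      ((parts.zip o.2).all (fun pr => PySem.Str.lower pr.1 == PySem.Str.lower pr.2)))

def build_leaf_module_names (module_raw_paths : List String) : List String × List String :=
  let module_parts := (module_raw_paths.filter (fun rp => rp != "")).map
      (fun rp => (rp, split_path_parts rp))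
  let r := module_parts.foldl
    (fun (st : List String × PySem.Set String × PySem.Set String) e =>
      if e.2.isEmpty then st
      else
        let is_container := bln_is_container module_parts e.1 e.2
        let canonical := normalize_har_name e.1
        if canonical = "" then st
        else if is_container then (st.1, PySem.Set.add st.2.1 canonical, st.2.2)
        else if PySem.Set.contains st.2.2 canonical then st
        else (st.1 ++ [canonical], st.2.1, PySem.Set.add st.2.2 canonical))
    ([], [], [])
  (r.1, r.2.1)

-- ===== PORT B =====
def b_segments (raw_path : String) : List String :=
  let cleaned := PySem.Str.replace (PySem.Str.strip raw_path) "\\" "/"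
  ((PySem.Str.split? cleaned "/").getD []).filter (fun seg => seg != "" && seg != ".")

def b_suffixes : List String := [".z.so", ".har", ".hsp", ".hap", ".ets", ".ts", ".js", ".so"]

-- candidate[:len(candidate) - cut] with cut = length of the first matching suffix (0 if none)
def b_strip_suffix (candidate : String) : String :=
  let lc := PySem.Str.lower candidate
  let cut := ((b_suffixes.find? (fun suf => PySem.Str.endswith lc suf)).map
      (fun suf => PySem.Str.len suf)).getD 0
  PySem.Str.slice candidate none (some (PySem.Str.len candidate - cut))

def b_canonical (raw_path : String) : String :=
  let name := PySem.Str.replace (PySem.Str.strip raw_path) "\\" "/"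
  if name = "" then ""
  else if PySem.Str.startswith name "@" then
    if PySem.Str.isIn "/" name then name
    else
      let pieces := ((PySem.Str.split? name "/").getD []).filter (fun piece => piece != "")
      if pieces.length ≥ 2 then (PySem.List.pyGet? pieces 1).getD ""
      else if PySem.Str.startswith name "@ohos." then PySem.Str.slice name (some 6) none
      else name
  else
    let segs := b_segments name
    b_strip_suffix (match segs.getLast? with | some s => s | none => name)

-- the set comprehension {low[:k] for low in lowered for k in range(len(low))}
def b_proper_prefixes (lowered : List (List String)) : PySem.Set (List String) :=
  PySem.Set.ofList (lowered.flatMap (fun low => (List.range low.length).map (fun k => low.take k)))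

def build_leaf_module_names_alt (module_raw_paths : List String) : List String × List String :=
  let kept := (module_raw_paths.filter (fun rp => rp != "")).map (fun rp => (rp, b_segments rp))
  let lowered := kept.map (fun e => e.2.map PySem.Str.lower)
  let prefixes := b_proper_prefixes lowered
  let tagged := (kept.zip lowered).filterMap (fun kl =>
    if kl.1.2.isEmpty then none
    else
      let canonical := b_canonical kl.1.1
      if canonical = "" then none
      else some (canonical, PySem.Set.contains prefixes kl.2))
  (PySem.List.dedup (tagged.filterMap (fun t => if t.2 then none else some t.1)),
   PySem.Set.ofList (tagged.filterMap (fun t => if t.2 then some t.1 else none)))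

-- ===== PRECONDITION & SPEC =====
def Spec_build_leaf_module_names (module_raw_paths : List String) (out : List String × List String) : Prop := out = build_leaf_module_names_alt module_raw_paths
instance (module_raw_paths : List String) (out : List String × List String) : Decidable (Spec_build_leaf_module_names module_raw_paths out) := by unfold Spec_build_leaf_module_names; infer_instance

-- ===== CLAIM (what is proved, stated in full; the proofs are below) =====
def Claim_equal_build_leaf_module_names : Prop := ∀ (module_raw_paths : List String), Dom_build_leaf_module_names module_raw_paths → Spec_build_leaf_module_names module_raw_paths (build_leaf_module_names module_raw_paths)

-- ===== LEMMAS AND PROOFS =====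

theorem b_segments_eq : b_segments = split_path_parts := rfl

-- one suffix step: candidate[:-len(suf)] = candidate[:len(candidate)-len(suf)] once suf matches
theorem strip_case (c suf : String) (hpos : 0 < suf.toList.length)
    (h : PySem.Str.endswith (PySem.Str.lower c) suf = true) :
    PySem.Str.slice c none (some (-(PySem.Str.len suf))) =
      PySem.Str.slice c none (some (PySem.Str.len c - PySem.Str.len suf)) := by
  have h' : PySem.Chars.endswith (PySem.Str.lower c).toList suf.toList = true := h
  have hs : suf.toList <:+ (PySem.Str.lower c).toList := (PySem.Chars.endswith_iff _ _).mp h'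
  have hle : suf.toList.length ≤ c.toList.length := by
    have := hs.length_le
    simpa [PySem.Str.toList_lower, PySem.Chars.lower] using this
  apply String.toList_inj.mp
  rw [PySem.Str.toList_slice, PySem.Str.toList_slice]
  show PySem.List.slice c.toList none (some (-(PySem.Str.len suf))) =
    PySem.List.slice c.toList none (some (PySem.Str.len c - PySem.Str.len suf))
  rw [PySem.Str.len_eq, PySem.Str.len_eq,
      PySem.List.slice_to_neg_natCast _ _ hpos,
      PySem.List.slice_to _ (by omega)]
  congr 1
  omega

-- candidate[:len(candidate) - 0] is candidate
theorem slice_full (c : String) :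
    PySem.Str.slice c none (some (PySem.Str.len c - 0)) = c := by
  apply String.toList_inj.mp
  rw [PySem.Str.toList_slice]
  show PySem.List.slice c.toList none (some (PySem.Str.len c - 0)) = c.toList
  rw [PySem.Str.len_eq, sub_zero, PySem.List.slice_to _ (by omega)]
  simp

-- A's first-match suffix loop is B's find?-then-slice, for any list of nonempty suffixes
theorem strip_gen (c : String) :
    ∀ L : List String, (∀ s ∈ L, 0 < s.toList.length) →
    nhn_strip_suffix c (PySem.Str.lower c) L =
      PySem.Str.slice c none (some (PySem.Str.len c -
        ((L.find? (fun suf => PySem.Str.endswith (PySem.Str.lower c) suf)).map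
          (fun suf => PySem.Str.len suf)).getD 0)) := by
  intro L
  induction L with
  | nil =>
    intro _
    simp only [nhn_strip_suffix, List.find?_nil, Option.map_none, Option.getD_none]
    exact (slice_full c).symm
  | cons suf rest ih =>
    intro hL
    by_cases h : PySem.Str.endswith (PySem.Str.lower c) suf
    · rw [List.find?_cons_of_pos h]
      simp only [nhn_strip_suffix, h, if_true, Option.map_some, Option.getD_some]
      exact strip_case c suf (hL suf (List.mem_cons_self ..)) h
    · rw [List.find?_cons_of_neg (by simpa [Bool.not_eq_true, PySem.Str.endswith, PySem.Str.toList_lower] using h)]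
      simp only [nhn_strip_suffix, h, if_false, Bool.false_eq_true]
      exact ih (fun s hs => hL s (List.mem_cons_of_mem _ hs))

theorem strip_eq (c : String) :
    nhn_strip_suffix c (PySem.Str.lower c) [".z.so", ".har", ".hsp", ".hap", ".ets", ".ts", ".js", ".so"] =
      b_strip_suffix c := by
  unfold b_strip_suffix b_suffixes
  exact strip_gen c [".z.so", ".har", ".hsp", ".hap", ".ets", ".ts", ".js", ".so"] (by decide)

theorem canonical_eq : b_canonical = normalize_har_name := by
  funext raw
  unfold b_canonical normalize_har_name last_path_part
  rw [b_segments_eq]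
  dsimp only
  split_ifs
  · rfl
  · rfl
  · rfl
  · rfl
  · rfl
  · exact (strip_eq _).symm

-- folding over l.zip (l.map f) is folding over l with the mapped value recomputed
theorem zip_map_self {α β : Type} (l : List α) (f : α → β) :
    l.zip (l.map f) = l.map (fun x => (x, f x)) := by
  induction l with
  | nil => rfl
  | cons a t ih => simp [ih]

-- the zipped all-lower test is exactly prefix of the lowered lists (when not longer)
theorem zip_all_lower_iff (l₁ l₂ : List String) (h : l₁.length ≤ l₂.length) :
    ((l₁.zip l₂).all (fun pr => PySem.Str.lower pr.1 == PySem.Str.lower pr.2)) = true ↔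
      l₁.map PySem.Str.lower <+: l₂.map PySem.Str.lower := by
  induction l₁ generalizing l₂ with
  | nil => simp
  | cons a t ih =>
    cases l₂ with
    | nil => simp at h
    | cons b t₂ =>
      simp only [List.length_cons, Nat.add_le_add_iff_right] at h
      simp only [List.zip_cons_cons, List.all_cons, List.map_cons, List.cons_prefix_cons,
        Bool.and_eq_true, beq_iff_eq, ih t₂ h]

-- membership in the proper-prefix set is the existential "proper prefix of some lowered tuple"
theorem mem_proper_prefixes (lowered : List (List String)) (x : List String) :
    PySem.Set.contains (b_proper_prefixes lowered) x = true ↔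
      ∃ t ∈ lowered, x <+: t ∧ x.length < t.length := by
  unfold b_proper_prefixes
  rw [show PySem.Set.contains (PySem.Set.ofList (lowered.flatMap
        (fun t => (List.range t.length).map (fun k => t.take k)))) x =
      decide (x ∈ PySem.Set.ofList (lowered.flatMap
        (fun t => (List.range t.length).map (fun k => t.take k)))) from by
    simp [PySem.Set.contains]]
  rw [decide_eq_true_iff, PySem.Set.mem_ofList]
  simp only [List.mem_flatMap, List.mem_map, List.mem_range]
  constructor
  · rintro ⟨t, ht, k, hk, rfl⟩
    exact ⟨t, ht, List.take_prefix k t, by simp [Nat.min_eq_left (Nat.le_of_lt hk), hk]⟩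
  · rintro ⟨t, ht, hpre, hlt⟩
    exact ⟨t, ht, x.length, hlt, (List.prefix_iff_eq_take.mp hpre).symm⟩

-- A's inner scan equals B's prefix-set membership, for entries whose parts come from their path
theorem is_container_iff (mp : List (String × List String))
    (hmp : ∀ p ∈ mp, p.2 = split_path_parts p.1)
    (e : String × List String) (he : e ∈ mp) :
    bln_is_container mp e.1 e.2 =
      PySem.Set.contains (b_proper_prefixes (mp.map (fun p => p.2.map PySem.Str.lower)))
        (e.2.map PySem.Str.lower) := by
  rw [Bool.eq_iff_iff, bln_is_container, List.any_eq_true, mem_proper_prefixes]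
  constructor
  · rintro ⟨o, ho, hb⟩
    simp only [Bool.and_eq_true, Bool.not_eq_true', beq_eq_false_iff_ne, decide_eq_true_eq] at hb
    obtain ⟨⟨hne, hlen⟩, hall⟩ := hb
    refine ⟨o.2.map PySem.Str.lower, List.mem_map.mpr ⟨o, ho, rfl⟩, ?_, by simpa using hlen⟩
    exact (zip_all_lower_iff _ _ (Nat.le_of_lt hlen)).mp hall
  · rintro ⟨t, ht, hpre, hlt⟩
    rcases List.mem_map.mp ht with ⟨o, ho, rfl⟩
    simp only [List.length_map] at hlt
    refine ⟨o, ho, ?_⟩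
    simp only [Bool.and_eq_true, Bool.not_eq_true', beq_eq_false_iff_ne, decide_eq_true_eq]
    refine ⟨⟨fun hrp => ?_, hlt⟩, (zip_all_lower_iff _ _ (Nat.le_of_lt hlt)).mpr hpre⟩
    rw [hmp e he, hmp o ho, hrp] at hlt
    exact lt_irrefl _ hlt

-- the tagging function (proof-only name for the common match shape)
def tagOf (prefixes : PySem.Set (List String)) (e : String × List String) : Option (String × Bool) :=
  if e.2.isEmpty then none
  else
    let canonical := normalize_har_name e.1
    if canonical = "" then none
    else some (canonical, PySem.Set.contains prefixes (e.2.map PySem.Str.lower))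

-- A's interleaved fold over tagged entries splits into the two staged dedup folds
theorem fold_tag {α : Type} (g : α → Option (String × Bool)) (ts : List α) :
    ∀ (seen cont : PySem.Set String),
    ts.foldl
      (fun (st : List String × PySem.Set String × PySem.Set String) e =>
        match g e with
        | none => st
        | some cb =>
          if cb.2 then (st.1, PySem.Set.add st.2.1 cb.1, st.2.2)
          else if PySem.Set.contains st.2.2 cb.1 then st
          else (st.1 ++ [cb.1], st.2.1, PySem.Set.add st.2.2 cb.1))
      (seen, cont, seen)
    = (((ts.filterMap g).filterMap (fun t => if t.2 then none else some t.1)).foldl PySem.Set.add seen,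
       ((ts.filterMap g).filterMap (fun t => if t.2 then some t.1 else none)).foldl PySem.Set.add cont,
       ((ts.filterMap g).filterMap (fun t => if t.2 then none else some t.1)).foldl PySem.Set.add seen) := by
  induction ts with
  | nil => intro seen cont; rfl
  | cons a t ih =>
    intro seen cont
    rw [List.foldl_cons, List.filterMap_cons]
    cases hg : g a with
    | none => exact ih seen cont
    | some cb =>
      by_cases hb : cb.2 = true
      · simp only [hb, if_true, List.filterMap_cons, List.foldl_cons]
        exact ih seen (PySem.Set.add cont cb.1)
      · have hb' : cb.2 = false := by simpa using hb
        simp only [hb', List.filterMap_cons, Bool.false_eq_true, if_false, List.foldl_cons]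
        by_cases hc : PySem.Set.contains seen cb.1 = true
        · rw [if_pos hc]
          have hadd : PySem.Set.add seen cb.1 = seen := by
            unfold PySem.Set.add; exact if_pos hc
          rw [hadd]
          exact ih seen cont
        · rw [if_neg hc]
          have hadd : PySem.Set.add seen cb.1 = seen ++ [cb.1] := by
            unfold PySem.Set.add; exact if_neg hc
          rw [← hadd]
          exact ih (PySem.Set.add seen cb.1) cont

-- membership in the (path, parts) list determines the parts field
theorem map_pair_snd {α β : Type} {f : α → β} {l : List α} {p : α × β}
    (hp : p ∈ l.map (fun rp => (rp, f rp))) : p.2 = f p.1 := by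
  rcases List.mem_map.mp hp with ⟨rp, _, rfl⟩
  rfl

-- A's fold (let-inlined) versus B's staged pipeline, over an abstract entry list mp
theorem bridge_flat (mp : List (String × List String))
    (hmp : ∀ p ∈ mp, p.2 = split_path_parts p.1) :
    ((List.foldl
        (fun (st : List String × PySem.Set String × PySem.Set String) e =>
          if e.2.isEmpty = true then st
          else
            if normalize_har_name e.1 = "" then st
            else
              if bln_is_container mp e.1 e.2 = true then
                (st.1, st.2.1.add (normalize_har_name e.1), st.2.2)
              else
                if st.2.2.contains (normalize_har_name e.1) = true then st
                else (st.1 ++ [normalize_har_name e.1], st.2.1, st.2.2.add (normalize_har_name e.1)))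
        ([], [], []) mp).1,
     (List.foldl
        (fun (st : List String × PySem.Set String × PySem.Set String) e =>
          if e.2.isEmpty = true then st
          else
            if normalize_har_name e.1 = "" then st
            else
              if bln_is_container mp e.1 e.2 = true then
                (st.1, st.2.1.add (normalize_har_name e.1), st.2.2)
              else
                if st.2.2.contains (normalize_har_name e.1) = true then st
                else (st.1 ++ [normalize_har_name e.1], st.2.1, st.2.2.add (normalize_har_name e.1)))
        ([], [], []) mp).2.1)
    = (PySem.List.dedup
        (List.filterMap (fun t => if t.2 = true then none else some t.1)
          (List.filterMap
            (fun (x : (String × List String) × List String) =>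
              if x.1.2.isEmpty = true then none
              else
                if normalize_har_name x.1.1 = "" then none
                else
                  some (normalize_har_name x.1.1,
                    (b_proper_prefixes (List.map (fun e => List.map PySem.Str.lower e.2) mp)).contains x.2))
            (mp.zip (List.map (fun e => List.map PySem.Str.lower e.2) mp)))),
       PySem.Set.ofList
        (List.filterMap (fun t => if t.2 = true then some t.1 else none)
          (List.filterMap
            (fun (x : (String × List String) × List String) =>
              if x.1.2.isEmpty = true then none
              else
                if normalize_har_name x.1.1 = "" then none
                else
                  some (normalize_har_name x.1.1,
                    (b_proper_prefixes (List.map (fun e => List.map PySem.Str.lower e.2) mp)).contains x.2))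
            (mp.zip (List.map (fun e => List.map PySem.Str.lower e.2) mp))))) := by
  have hA : List.foldl
      (fun (st : List String × PySem.Set String × PySem.Set String) e =>
        if e.2.isEmpty = true then st
        else
          if normalize_har_name e.1 = "" then st
          else
            if bln_is_container mp e.1 e.2 = true then
              (st.1, st.2.1.add (normalize_har_name e.1), st.2.2)
            else
              if st.2.2.contains (normalize_har_name e.1) = true then st
              else (st.1 ++ [normalize_har_name e.1], st.2.1, st.2.2.add (normalize_har_name e.1)))
      ([], [], []) mp
    = List.foldl
      (fun (st : List String × PySem.Set String × PySem.Set String) e =>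
        match tagOf (b_proper_prefixes (List.map (fun e => List.map PySem.Str.lower e.2) mp)) e with
        | none => st
        | some cb =>
          if cb.2 then (st.1, PySem.Set.add st.2.1 cb.1, st.2.2)
          else if PySem.Set.contains st.2.2 cb.1 then st
          else (st.1 ++ [cb.1], st.2.1, PySem.Set.add st.2.2 cb.1))
      ([], [], []) mp := by
    apply PySem.List.foldl_congr_mem
    intro acc e he
    rw [is_container_iff mp hmp e he]
    unfold tagOf
    by_cases h1 : e.2.isEmpty = true
    · rw [if_pos h1, if_pos h1]
    · rw [if_neg h1, if_neg h1]
      by_cases h2 : normalize_har_name e.1 = ""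
      · rw [if_pos h2, if_pos h2]
      · rw [if_neg h2, if_neg h2]
  rw [hA, fold_tag (tagOf (b_proper_prefixes (List.map (fun e => List.map PySem.Str.lower e.2) mp))) mp [] []]
  have hzip : List.filterMap
      (fun (x : (String × List String) × List String) =>
        if x.1.2.isEmpty = true then none
        else
          if normalize_har_name x.1.1 = "" then none
          else
            some (normalize_har_name x.1.1,
              (b_proper_prefixes (List.map (fun e => List.map PySem.Str.lower e.2) mp)).contains x.2))
      (mp.zip (List.map (fun e => List.map PySem.Str.lower e.2) mp))
    = mp.filterMap (tagOf (b_proper_prefixes (List.map (fun e => List.map PySem.Str.lower e.2) mp))) := by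
    rw [zip_map_self, List.filterMap_map]
    rfl
  rw [hzip, PySem.List.dedup_eq_ofList]
  rfl

-- ===== VERDICT (by name: the statement is the Claim_ definition above) =====
theorem build_leaf_module_names_spec : Claim_equal_build_leaf_module_names := by
  intro rps _
  unfold Spec_build_leaf_module_names build_leaf_module_names build_leaf_module_names_alt
  simp only [b_segments_eq, canonical_eq]
  generalize hgen : List.map (fun rp => (rp, split_path_parts rp)) (List.filter (fun rp => rp != "") rps) = mp
  refine bridge_flat mp ?_
  subst hgen
  intro p hp
  exact map_pair_snd hp
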